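-- pv_equiv track=rewrite | github.com/ytanne2211/Coding-Challenges | CC2.py | isItBalanced
-- ===== SOURCE A (Python) =====
-- def isItBalanced(string):
--     balanced = True
--     for i in range (0,len(string)):
--         letter = string[i]
--         for j in range (i,len(string)):
--             if letter == '(':
--                 if string[j] == ')' :
--                     if (j-i)%2 == 0  :
--                         balanced = False
--                     break
--             if letter == '[':
--                 if string[j] == ']' :
--                     if (j-i)%2 == 0 :
--                         balanced = False
--                     break
--             if letter == '{':
--                 if string[j] == '}' :
--                     if (j-i)%2 == 0 :
--                         balanced = False
--                     break
--
--     return balanced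
-- ===== SOURCE B (Python) =====
-- def isItBalanced(string):
--     # One backward pass: maintain the next occurrence index of each close
--     # bracket; at an open bracket check parity of the distance in O(1).
--     close_of = {'(': ')', '[': ']', '{': '}'}
--     nxt = {')': None, ']': None, '}': None}
--     balanced = True
--     for i in range(len(string) - 1, -1, -1):
--         c = string[i]
--         if c in nxt:
--             nxt[c] = i
--         elif c in close_of:
--             j = nxt[close_of[c]]
--             if j is not None and (j - i) % 2 == 0:
--                 balanced = False
--     return balanced
-- ===== Notes on version B (the rewrite author's own statement) =====
-- stated objective: faster
-- what changed: Replaced A's per-position forward scan for the next matching close bracket (nested loops) with a single backward pass that maintains the next occurrence index of each close bracket, giving an O(1) parity check per open bracket.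
import Mathlib
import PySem

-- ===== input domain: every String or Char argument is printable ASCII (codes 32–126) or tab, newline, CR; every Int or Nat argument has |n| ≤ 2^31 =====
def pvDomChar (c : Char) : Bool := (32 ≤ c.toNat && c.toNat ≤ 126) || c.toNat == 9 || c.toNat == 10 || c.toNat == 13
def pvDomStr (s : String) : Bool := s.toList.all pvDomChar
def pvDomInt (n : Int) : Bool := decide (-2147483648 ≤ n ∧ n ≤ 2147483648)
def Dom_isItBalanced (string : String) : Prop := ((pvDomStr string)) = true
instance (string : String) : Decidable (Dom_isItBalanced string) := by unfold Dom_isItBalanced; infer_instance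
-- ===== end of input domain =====

-- B replaces A's quadratic forward scan-for-next-close with a single backward
-- pass maintaining the next index of each close bracket (objective: faster, asymptotic).

-- ===== PORT A =====
-- inner 'for j in range(i, len(string))' loop of A, with its break semantics
def isItBalancedInner (s : List Char) (letter : Char) (i : Nat) : List Nat → Bool → Bool
  | [], bal => bal
  | j :: rest, bal =>
    if letter = '(' ∧ s.getD j ' ' = ')' then (if (j - i) % 2 = 0 then false else bal)
    else if letter = '[' ∧ s.getD j ' ' = ']' then (if (j - i) % 2 = 0 then false else bal)
    else if letter = '{' ∧ s.getD j ' ' = '}' then (if (j - i) % 2 = 0 then false else bal)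
    else isItBalancedInner s letter i rest bal

def isItBalanced (string : String) : Bool :=
  let s := string.toList
  let n := s.length
  (List.range n).foldl (fun bal i =>
    let letter := s.getD i ' '
    isItBalancedInner s letter i (List.range' i (n - i)) bal) true

-- ===== PORT B =====
-- backward 'for i in range(len(string)-1, -1, -1)' loop of Source B as structural
-- recursion (the suffix is processed first); state = (next ')', next ']', next '}', balanced)
def isItBalancedAltGo : List Char → Nat → Option Nat × Option Nat × Option Nat × Bool
  | [], _ => (none, none, none, true)
  | c :: rest, i =>
    let st := isItBalancedAltGo rest (i + 1)
    let p := st.1; let b := st.2.1; let k := st.2.2.1; let bal := st.2.2.2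
    if c = ')' then (some i, b, k, bal)
    else if c = ']' then (p, some i, k, bal)
    else if c = '}' then (p, b, some i, bal)
    else if c = '(' then (p, b, k, match p with | some j => if (j - i) % 2 = 0 then false else bal | none => bal)
    else if c = '[' then (p, b, k, match b with | some j => if (j - i) % 2 = 0 then false else bal | none => bal)
    else if c = '{' then (p, b, k, match k with | some j => if (j - i) % 2 = 0 then false else bal | none => bal)
    else (p, b, k, bal)

def isItBalanced_alt (string : String) : Bool :=
  (isItBalancedAltGo string.toList 0).2.2.2

-- ===== PRECONDITION & SPEC =====
def Spec_isItBalanced (string : String) (out : Bool) : Prop := out = isItBalanced_alt string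
instance (string : String) (out : Bool) : Decidable (Spec_isItBalanced string out) := by unfold Spec_isItBalanced; infer_instance

-- ===== CLAIM (what is proved, stated in full; the proofs are below) =====
def Claim_equal_isItBalanced : Prop := ∀ (string : String), Dom_isItBalanced string → Spec_isItBalanced string (isItBalanced string)

-- ===== LEMMAS AND PROOFS =====

-- common specification glue: first index of c in a list
def nxtIdx (c : Char) : List Char → Option Nat
  | [] => none
  | x :: rest => if x = c then some 0 else (nxtIdx c rest).map (· + 1)

def closeCh (c : Char) : Char := if c = '(' then ')' else if c = '[' then ']' else '}'
def isOpenCh (c : Char) : Bool := c = '(' || c = '[' || c = '{'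

def okAt (c : Char) (rest : List Char) : Bool :=
  if isOpenCh c then
    match nxtIdx (closeCh c) rest with
    | some k => !((k + 1) % 2 == 0)
    | none => true
  else true

def chk : List Char → Bool
  | [] => true
  | c :: rest => okAt c rest && chk rest

-- common specification glue (cont.): first index of c, absolute indexing from base i
def nxtFrom (c : Char) : List Char → Nat → Option Nat
  | [], _ => none
  | x :: rest, i => if x = c then some i else nxtFrom c rest (i + 1)

lemma nxtFrom_eq (c : Char) (s : List Char) : ∀ i : Nat,
    nxtFrom c s i = (nxtIdx c s).map (· + i) := by
  induction s with
  | nil => intro i; rfl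
  | cons x rest ih =>
    intro i
    by_cases h : x = c
    · simp [nxtFrom, nxtIdx, h]
    · simp only [nxtFrom, nxtIdx, if_neg h, ih (i + 1), Option.map_map]
      cases nxtIdx c rest with
      | none => rfl
      | some k => simp; omega

lemma bal_open (cc : Char) (rest : List Char) (i : Nat) (hne : isOpenCh cc = true)
    (hcl : closeCh cc = clc) :
    (match nxtFrom clc rest (i + 1) with
      | some j => if (j - i) % 2 = 0 then false else chk rest
      | none => chk rest) = (okAt cc rest && chk rest) := by
  rw [nxtFrom_eq]
  subst hcl
  cases hk : nxtIdx (closeCh cc) rest with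
  | none => simp [okAt, hne, hk]
  | some k =>
    simp only [Option.map_some, okAt, hne, if_true, hk]
    have : k + (i + 1) - i = k + 1 := by omega
    rw [this]
    cases h : (k + 1) % 2 == 0 <;> simp_all

lemma altGo_eq (s : List Char) : ∀ i : Nat,
    isItBalancedAltGo s i =
      (nxtFrom ')' s i, nxtFrom ']' s i, nxtFrom '}' s i, chk s) := by
  induction s with
  | nil => intro i; rfl
  | cons c rest ih =>
    intro i
    simp only [isItBalancedAltGo, ih (i + 1), chk]
    by_cases h1 : c = ')'
    · subst h1; simp [nxtFrom, okAt, isOpenCh]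
    by_cases h2 : c = ']'
    · subst h2; simp [nxtFrom, okAt, isOpenCh]
    by_cases h3 : c = '}'
    · subst h3; simp [nxtFrom, okAt, isOpenCh]
    by_cases h4 : c = '('
    · subst h4
      rw [if_neg (by decide : ¬('(' = ')')), if_neg (by decide : ¬('(' = ']')),
        if_neg (by decide : ¬('(' = '}')), if_pos (rfl : '(' = '(')]
      simp only [Prod.mk.injEq]
      refine ⟨by simp [nxtFrom], by simp [nxtFrom], by simp [nxtFrom], ?_⟩
      exact bal_open '(' rest i (by decide) rfl
    by_cases h5 : c = '['
    · subst h5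
      rw [if_neg (by decide : ¬('[' = ')')), if_neg (by decide : ¬('[' = ']')),
        if_neg (by decide : ¬('[' = '}')), if_neg (by decide : ¬('[' = '(')), if_pos (rfl : '[' = '[')]
      simp only [Prod.mk.injEq]
      refine ⟨by simp [nxtFrom], by simp [nxtFrom], by simp [nxtFrom], ?_⟩
      exact bal_open '[' rest i (by decide) rfl
    by_cases h6 : c = '{'
    · subst h6
      rw [if_neg (by decide : ¬('{' = ')')), if_neg (by decide : ¬('{' = ']')),
        if_neg (by decide : ¬('{' = '}')), if_neg (by decide : ¬('{' = '(')),
        if_neg (by decide : ¬('{' = '[')), if_pos (rfl : '{' = '{')]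
      simp only [Prod.mk.injEq]
      refine ⟨by simp [nxtFrom], by simp [nxtFrom], by simp [nxtFrom], ?_⟩
      exact bal_open '{' rest i (by decide) rfl
    · simp only [nxtFrom, if_neg h1, if_neg h2, if_neg h3, if_neg h4, if_neg h5, if_neg h6]
      have : okAt c rest = true := by
        simp [okAt, isOpenCh, h4, h5, h6]
      rw [this, Bool.true_and]

lemma inner_eq (s : List Char) (letter : Char) (i : Nat) :
    ∀ (t : List Char) (j : Nat) (bal : Bool), j ≤ s.length → s.drop j = t →
    isItBalancedInner s letter i (List.range' j (s.length - j)) bal =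
      (if isOpenCh letter then
        match nxtIdx (closeCh letter) t with
        | some k => if (j + k - i) % 2 = 0 then false else bal
        | none => bal
      else bal) := by
  intro t
  induction t with
  | nil =>
    intro j bal hle hdrop
    have hn : s.length - j = 0 := by
      have := List.drop_eq_nil_iff.mp hdrop; omega
    rw [hn]
    simp only [List.range'_zero, isItBalancedInner, nxtIdx]
    split <;> rfl
  | cons x t' ih =>
    intro j bal hle hdrop
    have hx : s[j]? = some x := by
      have h0 : (s.drop j)[0]? = s[j + 0]? := List.getElem?_drop
      rw [hdrop] at h0; simpa using h0.symm
    have hj : j < s.length := by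
      by_contra h
      rw [List.getElem?_eq_none (by omega)] at hx
      cases hx
    have hgetD : s.getD j ' ' = x := by
      simp [List.getD_eq_getElem?_getD, hx]
    have ht' : s.drop (j + 1) = t' := by
      have h1 : s.drop (j + 1) = (s.drop j).drop 1 := by rw [List.drop_drop]
      rw [h1, hdrop]; rfl
    have hn : s.length - j = (s.length - (j + 1)) + 1 := by omega
    rw [hn, List.range'_succ]
    simp only [isItBalancedInner, hgetD]
    by_cases ho : isOpenCh letter = true
    · have hcc : letter = '(' ∨ letter = '[' ∨ letter = '{' := by
        simp [isOpenCh] at ho; tauto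
      by_cases hmatch : x = closeCh letter
      · have hnx : nxtIdx (closeCh letter) (x :: t') = some 0 := by
          simp [nxtIdx, hmatch]
        rw [hnx]
        simp only [ho, if_true]
        rcases hcc with h | h | h <;> subst h <;>
          (simp [closeCh] at hmatch; subst hmatch; simp)
      · have hne : ¬ ((letter = '(' ∧ x = ')') ∨ (letter = '[' ∧ x = ']') ∨ (letter = '{' ∧ x = '}')) := by
          rintro (⟨hl, hr⟩ | ⟨hl, hr⟩ | ⟨hl, hr⟩) <;> subst hl <;> exact hmatch (by simp [closeCh, hr])
        rw [if_neg (by tauto), if_neg (by tauto), if_neg (by tauto)]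
        rw [ih (j + 1) bal (by omega) ht']
        simp only [ho, if_true]
        have hnx : nxtIdx (closeCh letter) (x :: t') = (nxtIdx (closeCh letter) t').map (· + 1) := by
          simp [nxtIdx, hmatch]
        rw [hnx]
        cases hk : nxtIdx (closeCh letter) t' with
        | none => rfl
        | some k =>
          simp only [Option.map_some]
          have h2 : j + (k + 1) - i = j + 1 + k - i := by omega
          rw [h2]
    · have hne : ¬ ((letter = '(' ∧ x = ')') ∨ (letter = '[' ∧ x = ']') ∨ (letter = '{' ∧ x = '}')) := by
        rintro (⟨hl, _⟩ | ⟨hl, _⟩ | ⟨hl, _⟩) <;> subst hl <;> simp [isOpenCh] at ho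
      rw [if_neg (by tauto), if_neg (by tauto), if_neg (by tauto)]
      rw [ih (j + 1) bal (by omega) ht']
      simp [ho]

lemma inner_at (s : List Char) (i : Nat) (bal : Bool) (letter : Char)
    (hi : i < s.length) (hl : s.getD i ' ' = letter) :
    isItBalancedInner s letter i (List.range' i (s.length - i)) bal =
      (bal && okAt letter (s.drop (i + 1))) := by
  have hdrop : s.drop i = letter :: s.drop (i + 1) := by
    have h1 : s.drop i = s[i] :: s.drop (i + 1) := List.drop_eq_getElem_cons hi
    rw [h1]
    congr 1
    rw [← hl]
    simp [List.getD_eq_getElem?_getD, List.getElem?_eq_getElem hi]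
  rw [inner_eq s letter i (letter :: s.drop (i + 1)) i bal (by omega) hdrop]
  by_cases ho : isOpenCh letter = true
  · have hne : letter ≠ closeCh letter := by
      have hcc : letter = '(' ∨ letter = '[' ∨ letter = '{' := by
        simp [isOpenCh] at ho; tauto
      rcases hcc with h | h | h <;> rw [h] <;> decide
    have hnx : nxtIdx (closeCh letter) (letter :: s.drop (i + 1)) =
        (nxtIdx (closeCh letter) (s.drop (i + 1))).map (· + 1) := by
      simp [nxtIdx, hne]
    rw [hnx]
    simp only [ho, if_true, okAt]
    cases hk : nxtIdx (closeCh letter) (s.drop (i + 1)) with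
    | none => simp
    | some k =>
      simp only [Option.map_some]
      have h2 : i + (k + 1) - i = k + 1 := by omega
      rw [h2]
      cases h : (k + 1) % 2 == 0 <;> simp_all
  · simp [ho, okAt]

lemma foldl_and_all (f : Nat → Bool) : ∀ (l : List Nat) (bal : Bool),
    l.foldl (fun b i => b && f i) bal = (bal && l.all f) := by
  intro l
  induction l with
  | nil => intro bal; simp
  | cons x xs ih => intro bal; simp [List.foldl_cons, ih, Bool.and_assoc]

lemma all_ok_eq_chk : ∀ s : List Char,
    (List.range s.length).all (fun i => okAt (s.getD i ' ') (s.drop (i + 1))) = chk s := by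
  intro s
  induction s with
  | nil => rfl
  | cons c rest ih =>
    rw [List.length_cons, List.range_succ_eq_map]
    simp only [List.all_cons, List.all_map]
    rw [chk, ← ih]
    congr 1

lemma isItBalanced_eq_chk (s : List Char) :
    (List.range s.length).foldl (fun bal i =>
      isItBalancedInner s (s.getD i ' ') i (List.range' i (s.length - i)) bal) true = chk s := by
  have hcong : (List.range s.length).foldl (fun bal i =>
      isItBalancedInner s (s.getD i ' ') i (List.range' i (s.length - i)) bal) true =
      (List.range s.length).foldl (fun bal i => bal && okAt (s.getD i ' ') (s.drop (i + 1))) true := by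
    apply PySem.List.foldl_congr_mem
    intro bal i hi
    exact inner_at s i bal (s.getD i ' ') (List.mem_range.mp hi) rfl
  rw [hcong, foldl_and_all, Bool.true_and, all_ok_eq_chk]

-- ===== VERDICT (by name: the statement is the Claim_ definition above) =====
theorem isItBalanced_spec : Claim_equal_isItBalanced := by
  intro string _
  unfold Spec_isItBalanced isItBalanced isItBalanced_alt
  rw [altGo_eq string.toList 0]
  exact isItBalanced_eq_chk string.toList
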